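-- pv_equiv track=rewrite | github.com/riot662006/conway-game-of-life | game/entities/patterns.py | pat_to_rle
-- ===== SOURCE A (Python) =====
-- def pat_to_rle(pattern: list[tuple]):
--     """
--         Converts a pattern for the board to an RLE format
--
--     :param pattern: list[tuple[int, int]]
--     :return: string
--     """
--
--     # sorts the pattern by the y-axis then the x-axis
--     pattern.sort(key=lambda x: (x[1], x[0]))
--     lines = []
--     p = ""
--     compressed_p = ""
--
--     # to split the pattern into lines using the y-axis as the seperator
--     for x in pattern:
--         if len(lines) == 0:
--             lines.append([x])
--         else:
--             if lines[-1][-1][1] == x[1]: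
--                 lines[-1].append(x)
--             else:
--                 lines.append([x])
--
--     # to get all the character for dead and alive cells, end of a line and end of the pattern
--     while len(lines):
--         line = lines.pop(0)
--         prev = -1
--         for point in line:
--             if point[0] - prev - 1 != 0:
--                 p += "b" * (point[0] - prev - 1)
--             p += "o"
--             prev = point[0]
--
--         p += '$' * (lines[0][0][1] - line[0][1]) if len(lines) else '!'
--
--     # to compress this data to RLE format. two-pointer method for now.
--     start = 0
--     end = 1
--
--     while p[start] != '!':
--         if p[end] == '!' or p[end] != p[start]:
--             compressed_p += (str(end - start) if end - start > 1 else "") + p[start]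
--             start = end
--
--         end += 1
--
--     return compressed_p + "!"
-- ===== SOURCE B (Python) =====
-- def pat_to_rle(pattern: list[tuple]):
--     """Same RLE conversion, but emits run lengths directly from coordinate gaps
--     (no expanded intermediate string). Sorts `pattern` in place like the original."""
--     pattern.sort(key=lambda p: (p[1], p[0]))
--     runs = []  # merged runs [char, count]
--
--     def emit(ch, n):
--         if n <= 0:
--             return
--         if runs and runs[-1][0] == ch:
--             runs[-1][1] += n
--         else:
--             runs.append([ch, n])
--
--     prev_x = -1
--     prev_y = pattern[0][1]
--     for (x, y) in pattern:
--         if y != prev_y: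
--             emit('$', y - prev_y)
--             prev_x = -1
--             prev_y = y
--         emit('b', x - prev_x - 1)
--         emit('o', 1)
--         prev_x = x
--     return "".join((str(n) if n > 1 else "") + ch for ch, n in runs) + "!"
-- ===== Notes on version B (the rewrite author's own statement) =====
-- stated objective: faster
-- what changed: B emits merged (char, run-length) pairs directly from the sorted coordinate gaps and renders them once, instead of materialising the fully expanded b/o/$ string and re-compressing it with a two-pointer scan.
import Mathlib
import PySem

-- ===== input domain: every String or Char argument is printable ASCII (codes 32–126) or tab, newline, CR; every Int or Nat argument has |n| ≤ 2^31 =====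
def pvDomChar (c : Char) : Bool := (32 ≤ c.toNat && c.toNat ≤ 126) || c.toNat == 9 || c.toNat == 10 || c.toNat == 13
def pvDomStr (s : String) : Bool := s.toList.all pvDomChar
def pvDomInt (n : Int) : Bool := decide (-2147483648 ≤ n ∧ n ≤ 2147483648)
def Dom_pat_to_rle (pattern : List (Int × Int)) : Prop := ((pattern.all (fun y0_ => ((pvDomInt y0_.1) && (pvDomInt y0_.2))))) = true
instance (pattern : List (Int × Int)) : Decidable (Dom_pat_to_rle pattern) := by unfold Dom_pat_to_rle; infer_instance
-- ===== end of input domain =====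

-- B emits merged (char, run-length) pairs straight from the sorted coordinate gaps instead of
-- expanding the pattern to a b/o/$ string and re-compressing it (both sort `pattern` in place;
-- return-value equivalence is what is proved here).


-- ===== PORT A =====
-- one step of A's inner `for point in line` loop (state: the string p so far, prev)
def pvStep (st : List Char × Int) (pt : Int × Int) : List Char × Int :=
  ((if pt.1 - st.2 - 1 ≠ 0 then st.1 ++ List.replicate (pt.1 - st.2 - 1).toNat 'b' else st.1) ++ ['o'],
   pt.1)

-- A's `while len(lines)` loop; `line[0]` / `lines[0][0]` never raise because every line built by
-- the first loop is nonempty, so `headD (0,0)` is exact on all reachable states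
def pvALoop : List (List (Int × Int)) → List Char → List Char
  | [], p => p
  | line :: rest, p =>
    let st := line.foldl pvStep (p, -1)
    let p := st.1 ++
      (match rest with
       | [] => ['!']
       | l2 :: _ => List.replicate (((l2.headD (0, 0)).2 - (line.headD (0, 0)).2)).toNat '$')
    pvALoop rest p

-- A's two-pointer compression loop; in this program start/end are always ≥ 0 so Nat indices are
-- exact, and the `else acc` out-of-range branches (Python IndexError) are never reached
def pvCompress (p : List Char) (start e : Nat) (acc : List Char) : List Char :=
  if hs : start < p.length then
    if p[start] = '!' then acc
    else if he : e < p.length then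
      if p[e] = '!' ∨ p[e] ≠ p[start] then
        pvCompress p e (e + 1)
          (acc ++ (if ((e : Int) - (start : Int)) > 1 then PySem.Int.toChars ((e : Int) - (start : Int)) else []) ++ [p[start]])
      else pvCompress p start (e + 1) acc
    else acc
  else acc
termination_by p.length - e
decreasing_by all_goals omega

def pat_to_rle (pattern : List (Int × Int)) : String :=
  let s := PySem.List.sorted2 pattern (fun x => x.2) (fun x => x.1)
  -- the `for x in pattern` line-splitting loop; lines[-1][-1] is exact via getLastD (lines and
  -- every line are nonempty whenever they are read)
  let lines := s.foldl (fun (lines : List (List (Int × Int))) x =>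
    if lines.length = 0 then lines ++ [[x]]
    else if ((lines.getLastD []).getLastD (0, 0)).2 = x.2 then
      lines.dropLast ++ [(lines.getLastD []) ++ [x]]
    else lines ++ [[x]]) []
  let p := pvALoop lines []
  String.mk (pvCompress p 0 1 [] ++ ['!'])

-- ===== PORT B =====
def pvEmit (runs : List (Char × Int)) (ch : Char) (n : Int) : List (Char × Int) :=
  if n ≤ 0 then runs
  else
    match runs.getLast? with
    | some (c, k) => if c = ch then runs.dropLast ++ [(c, k + n)] else runs ++ [(ch, n)]
    | none => runs ++ [(ch, n)]

-- one step of B's `for (x, y) in pattern` loop (state: runs, prev_x, prev_y)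
def pvBStep (st : List (Char × Int) × Int × Int) (xy : Int × Int) : List (Char × Int) × Int × Int :=
  let st1 := if xy.2 ≠ st.2.2 then (pvEmit st.1 '$' (xy.2 - st.2.2), (-1 : Int), xy.2) else st
  (pvEmit (pvEmit st1.1 'b' (xy.1 - st1.2.1 - 1)) 'o' 1, xy.1, st1.2.2)

-- B's final "".join comprehension
def pvRender : List (Char × Int) → List Char
  | [] => []
  | r :: R => (if r.2 > 1 then PySem.Int.toChars r.2 else []) ++ [r.1] ++ pvRender R

def pat_to_rle_alt (pattern : List (Int × Int)) : String :=
  let s := PySem.List.sorted2 pattern (fun x => x.2) (fun x => x.1)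
  -- pattern[0][1]: IndexError on the empty list, excluded by Pre_; headD is exact otherwise
  let st := s.foldl pvBStep ([], -1, (s.headD (0, 0)).2)
  String.mk (pvRender st.1 ++ ['!'])

-- ===== PRECONDITION & SPEC =====
-- Pre_ excludes only the empty list, on which both A and B raise IndexError
def Pre_pat_to_rle (pattern : List (Int × Int)) : Prop := pattern ≠ []
instance (pattern : List (Int × Int)) : Decidable (Pre_pat_to_rle pattern) := by
  unfold Pre_pat_to_rle; infer_instance
def pvWitness_pat_to_rle : (List (Int × Int)) := [(1, 0), (0, 2)]

def Spec_pat_to_rle (pattern : List (Int × Int)) (out : String) : Prop := out = pat_to_rle_alt pattern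
instance (pattern : List (Int × Int)) (out : String) : Decidable (Spec_pat_to_rle pattern out) := by
  unfold Spec_pat_to_rle; infer_instance

-- ===== CLAIM (what is proved, stated in full; the proofs are below) =====
def Claim_equal_pat_to_rle : Prop :=
  ∀ (pattern : List (Int × Int)), Dom_pat_to_rle pattern → Pre_pat_to_rle pattern →
    Spec_pat_to_rle pattern (pat_to_rle pattern)

-- ===== LEMMAS AND PROOFS =====

-- ---- proof-only vocabulary ----

-- the expanded b/o/$ string, produced in one pass (prev_x, prev_y threaded)
def pvExpand : List (Int × Int) → Int → Int → List Char
  | [], _, _ => []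
  | xy :: rest, px, py =>
    if xy.2 ≠ py then
      List.replicate (xy.2 - py).toNat '$' ++ List.replicate (xy.1 - (-1) - 1).toNat 'b' ++ ['o'] ++
        pvExpand rest xy.1 xy.2
    else
      List.replicate (xy.1 - px - 1).toNat 'b' ++ ['o'] ++ pvExpand rest xy.1 py

-- grouping of consecutive equal-y points, with a current (nonempty) line
def pvGrp (cur : List (Int × Int)) : List (Int × Int) → List (List (Int × Int))
  | [] => [cur]
  | x :: t => if ((cur.getLastD (0, 0)).2 = x.2) then pvGrp (cur ++ [x]) t else cur :: pvGrp [x] t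

-- what pvALoop appends to its accumulator
def pvLineRender : List (List (Int × Int)) → List Char
  | [] => []
  | [l] => (l.foldl pvStep ([], -1)).1 ++ ['!']
  | l :: l2 :: rest =>
    (l.foldl pvStep ([], -1)).1 ++
      List.replicate (((l2.headD (0, 0)).2 - (l.headD (0, 0)).2)).toNat '$' ++
      pvLineRender (l2 :: rest)

def pvDecode (R : List (Char × Int)) : List Char := R.flatMap (fun r => List.replicate r.2.toNat r.1)

def pvGood (R : List (Char × Int)) : Prop :=
  List.IsChain (fun (a b : Char × Int) => a.1 ≠ b.1) R ∧ ∀ r ∈ R, 1 ≤ r.2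

-- ---- small evaluation lemmas ----

theorem pvStep_eval (q : List Char) (prev : Int) (a : Int × Int) :
    pvStep (q, prev) a = (q ++ List.replicate (a.1 - prev - 1).toNat 'b' ++ ['o'], a.1) := by
  simp only [pvStep]
  split_ifs with h
  · simp
  · have : (a.1 - prev - 1).toNat = 0 := by omega
    simp [this]

theorem foldl_pvStep_prefix (line : List (Int × Int)) (p q : List Char) (prev : Int) :
    line.foldl pvStep (p ++ q, prev) =
      (p ++ (line.foldl pvStep (q, prev)).1, (line.foldl pvStep (q, prev)).2) := by
  induction line generalizing q prev with
  | nil => simp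
  | cons a l ih =>
    simp only [List.foldl_cons, pvStep_eval]
    rw [show (p ++ q) ++ List.replicate (a.1 - prev - 1).toNat 'b' ++ ['o'] =
          p ++ (q ++ List.replicate (a.1 - prev - 1).toNat 'b' ++ ['o']) by simp]
    exact ih _ _

theorem pvALoop_eq (ls : List (List (Int × Int))) (p : List Char) :
    pvALoop ls p = p ++ pvLineRender ls := by
  induction ls generalizing p with
  | nil => simp [pvALoop, pvLineRender]
  | cons l rest ih =>
    cases rest with
    | nil =>
      conv_lhs => rw [pvALoop]
      rw [show (p, (-1 : Int)) = (p ++ ([] : List Char), -1) by simp, foldl_pvStep_prefix]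
      simp [pvALoop, pvLineRender]
    | cons l2 rest' =>
      conv_lhs => rw [pvALoop]
      rw [show (p, (-1 : Int)) = (p ++ ([] : List Char), -1) by simp, foldl_pvStep_prefix]
      rw [ih]
      simp only [pvLineRender]
      simp

-- ---- A's lines foldl = pvGrp ----

theorem lines_foldl_eq_pvGrp (v : List (Int × Int)) :
    ∀ (L : List (List (Int × Int))) (cur : List (Int × Int)), cur ≠ [] →
      v.foldl (fun (lines : List (List (Int × Int))) x =>
        if lines.length = 0 then lines ++ [[x]]
        else if ((lines.getLastD []).getLastD (0, 0)).2 = x.2 then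
          lines.dropLast ++ [(lines.getLastD []) ++ [x]]
        else lines ++ [[x]]) (L ++ [cur]) = L ++ pvGrp cur v := by
  induction v with
  | nil => intro L cur _; simp [pvGrp]
  | cons x t ih =>
    intro L cur hcur
    simp only [List.foldl_cons, pvGrp]
    have hlen : ¬ (L ++ [cur]).length = 0 := by simp
    have hlast : (L ++ [cur]).getLastD [] = cur := by
      simp [List.getLastD_eq_getLast?]
    rw [if_neg hlen, hlast]
    split_ifs with h
    · rw [List.dropLast_concat]
      exact ih L (cur ++ [x]) (by simp)
    · rw [show (L ++ [cur]) ++ [[x]] = (L ++ [cur]) ++ [[x]] from rfl,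
        show L ++ cur :: pvGrp [x] t = (L ++ [cur]) ++ pvGrp [x] t by simp]
      exact ih (L ++ [cur]) [x] (by simp)

-- ---- pvGrp shape ----

theorem pvGrp_shape (t : List (Int × Int)) :
    ∀ cur, ∃ tw rest, pvGrp cur t = (cur ++ tw) :: rest := by
  induction t with
  | nil => exact fun cur => ⟨[], [], by simp [pvGrp]⟩
  | cons x t ih =>
    intro cur
    simp only [pvGrp]
    split_ifs with h
    · obtain ⟨tw, rest, hw⟩ := ih (cur ++ [x])
      exact ⟨[x] ++ tw, rest, by simpa using hw⟩
    · exact ⟨[], pvGrp [x] t, by simp⟩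

-- ---- pvLineRender ∘ pvGrp = pvExpand ----

theorem lineRender_pvGrp (t : List (Int × Int)) :
    ∀ (cur : List (Int × Int)), cur ≠ [] →
      (∀ a ∈ cur, a.2 = (cur.headD (0, 0)).2) →
      pvLineRender (pvGrp cur t) =
        (cur.foldl pvStep ([], -1)).1 ++
          pvExpand t (cur.foldl pvStep ([], -1)).2 (cur.headD (0, 0)).2 ++ ['!'] := by
  induction t with
  | nil => intro cur hc hy; simp [pvGrp, pvLineRender, pvExpand]
  | cons x t ih =>
    intro cur hc hy
    have hlastmem : cur.getLastD (0, 0) ∈ cur := by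
      cases cur with
      | nil => exact absurd rfl hc
      | cons a l =>
        rw [List.getLastD_eq_getLast?, List.getLast?_eq_getLast (h := by simp)]
        exact List.getLast_mem _
    have hlasty : (cur.getLastD (0, 0)).2 = (cur.headD (0, 0)).2 := hy _ hlastmem
    have hh : ∀ z, ((cur ++ [z]).headD (0, 0)) = (cur.headD (0, 0)) := by
      intro z
      cases cur with
      | nil => exact absurd rfl hc
      | cons b l => simp
    simp only [pvGrp]
    split_ifs with h
    · -- x joins the current line
      have hy' : ∀ a ∈ cur ++ [x], a.2 = ((cur ++ [x]).headD (0, 0)).2 := by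
        intro a ha
        rw [hh x]
        rcases List.mem_append.mp ha with h1 | h1
        · exact hy a h1
        · simp only [List.mem_singleton] at h1; subst h1; rw [← h, hlasty]
      rw [ih (cur ++ [x]) (by simp) hy', hh x]
      rw [List.foldl_append]
      simp only [List.foldl_cons, List.foldl_nil]
      have hst : pvStep (cur.foldl pvStep ([], -1)) x =
          ((cur.foldl pvStep ([], -1)).1 ++
            List.replicate (x.1 - (cur.foldl pvStep ([], -1)).2 - 1).toNat 'b' ++ ['o'], x.1) := by
        rw [show cur.foldl pvStep ([], (-1 : Int)) =
              ((cur.foldl pvStep ([], -1)).1, (cur.foldl pvStep ([], -1)).2) from rfl]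
        exact pvStep_eval _ _ _
      rw [hst]
      have hxne : ¬ (x.2 ≠ (cur.headD (0, 0)).2) := by
        rw [← hlasty]; exact fun hne => hne h.symm
      conv_rhs => rw [pvExpand]
      rw [if_neg hxne]
      simp
    · -- x starts a new line
      obtain ⟨tw, rest, hw⟩ := pvGrp_shape t [x]
      have hne : pvLineRender (cur :: pvGrp [x] t) =
          (cur.foldl pvStep ([], -1)).1 ++
            List.replicate ((x.2 - (cur.headD (0, 0)).2)).toNat '$' ++
            pvLineRender (pvGrp [x] t) := by
        rw [hw, show [x] ++ tw = x :: tw from rfl]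
        conv_lhs => rw [pvLineRender]
        simp
      rw [hne, ih [x] (by simp) (by simp)]
      simp only [List.foldl_cons, List.foldl_nil, pvStep_eval]
      have hxne : x.2 ≠ (cur.headD (0, 0)).2 := by
        rw [← hlasty]; exact fun he => h he.symm
      conv_rhs => rw [pvExpand]
      rw [if_pos hxne]
      simp

-- ---- B-side: pvEmit preserves Good, decodes to an appended run, keeps the char set ----

theorem pvEmit_decode (runs : List (Char × Int)) (c : Char) (n : Int) (h : pvGood runs) :
    pvDecode (pvEmit runs c n) = pvDecode runs ++ List.replicate n.toNat c := by
  by_cases hn : n ≤ 0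
  · have : n.toNat = 0 := by omega
    simp [pvEmit, hn, this]
  · simp only [pvEmit, if_neg hn]
    rcases hlast : runs.getLast? with _ | ⟨c', k⟩
    · have hnil : runs = [] := by
        cases runs with
        | nil => rfl
        | cons a l => simp at hlast
      subst hnil; simp [pvDecode]
    · obtain ⟨ys, hys⟩ := List.getLast?_eq_some_iff.mp hlast
      subst hys
      have hk : 1 ≤ k := h.2 (c', k) (by simp)
      dsimp only
      split_ifs with hcc
      · subst hcc
        rw [List.dropLast_concat]
        have h2 : (k + n).toNat = k.toNat + n.toNat := by omega
        simp only [pvDecode, List.flatMap_append, List.flatMap_cons, List.flatMap_nil]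
        rw [h2, List.replicate_add]
        simp
      · simp [pvDecode]

theorem pvEmit_good (runs : List (Char × Int)) (c : Char) (n : Int) (h : pvGood runs) :
    pvGood (pvEmit runs c n) := by
  by_cases hn : n ≤ 0
  · simpa [pvEmit, hn] using h
  · simp only [pvEmit, if_neg hn]
    rcases hlast : runs.getLast? with _ | ⟨c', k⟩
    · have hnil : runs = [] := by
        cases runs with
        | nil => rfl
        | cons a l => simp at hlast
      subst hnil
      refine ⟨by simp, ?_⟩
      intro r hr; simp at hr; subst hr; simp; omega
    · obtain ⟨ys, hys⟩ := List.getLast?_eq_some_iff.mp hlast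
      subst hys
      have hk : 1 ≤ k := h.2 (c', k) (by simp)
      have hchain := h.1
      dsimp only
      split_ifs with hcc
      · subst hcc
        rw [List.dropLast_concat]
        refine ⟨?_, ?_⟩
        · have h1 : List.IsChain (· ≠ ·) ((ys ++ [(c', k)]).map Prod.fst) :=
            List.isChain_map_of_isChain Prod.fst (fun a b h => h) hchain
          have h2 : (ys ++ [(c', k + n)]).map Prod.fst = (ys ++ [(c', k)]).map Prod.fst := by simp
          exact List.isChain_of_isChain_map Prod.fst (fun a b h => h) (h2 ▸ h1)
        · intro r hr
          rcases List.mem_append.mp hr with h1 | h1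
          · exact h.2 r (by simp [h1])
          · simp at h1; subst h1; simp; omega
      · refine ⟨?_, ?_⟩
        · refine List.IsChain.append hchain (by simp) ?_
          intro a ha b hb
          rw [List.getLast?_concat] at ha
          simp at ha hb
          subst ha; subst hb
          exact hcc
        · intro r hr
          rcases List.mem_append.mp hr with h1 | h1
          · exact h.2 r h1
          · simp at h1; subst h1; simp; omega

theorem pvEmit_chars (runs : List (Char × Int)) (c : Char) (n : Int)
    (P : Char → Prop) (h : ∀ r ∈ runs, P r.1) (hc : P c) :
    ∀ r ∈ pvEmit runs c n, P r.1 := by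
  intro r hr
  by_cases hn : n ≤ 0
  · exact h r (by simpa [pvEmit, hn] using hr)
  · simp only [pvEmit, if_neg hn] at hr
    rcases hlast : runs.getLast? with _ | ⟨c', k⟩ <;> rw [hlast] at hr
    · rcases List.mem_append.mp hr with h1 | h1
      · exact h r h1
      · simp at h1; subst h1; exact hc
    · obtain ⟨ys, hys⟩ := List.getLast?_eq_some_iff.mp hlast
      dsimp only at hr
      split_ifs at hr with hcc
      · rcases List.mem_append.mp hr with h1 | h1
        · exact h r (List.dropLast_sublist runs |>.mem h1)
        · simp at h1; subst h1
          exact h (c', k) (by simp [hys])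
      · rcases List.mem_append.mp hr with h1 | h1
        · exact h r h1
        · simp at h1; subst h1; exact hc

-- ---- B's fold decodes to pvExpand ----

theorem bfold_decode (l : List (Int × Int)) :
    ∀ (runs : List (Char × Int)) (px py : Int), pvGood runs → (∀ r ∈ runs, r.1 ≠ '!') →
      pvGood (l.foldl pvBStep (runs, px, py)).1 ∧
      (∀ r ∈ (l.foldl pvBStep (runs, px, py)).1, r.1 ≠ '!') ∧
      pvDecode (l.foldl pvBStep (runs, px, py)).1 = pvDecode runs ++ pvExpand l px py := by
  induction l with
  | nil => intro runs px py hg hP; exact ⟨hg, hP, by simp [pvExpand]⟩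
  | cons xy t ih =>
    intro runs px py hg hP
    simp only [List.foldl_cons, pvBStep]
    by_cases hyy : xy.2 ≠ py
    · simp only [if_pos hyy]
      have hg1 := pvEmit_good runs '$' (xy.2 - py) hg
      have hg2 := pvEmit_good _ 'b' (xy.1 - (-1) - 1) hg1
      have hg3 := pvEmit_good _ 'o' 1 hg2
      have hP1 := pvEmit_chars runs '$' (xy.2 - py) (fun ch => ch ≠ '!') hP (by decide : ('$' : Char) ≠ '!')
      have hP2 := pvEmit_chars _ 'b' (xy.1 - (-1) - 1) (fun ch => ch ≠ '!') hP1 (by decide : ('b' : Char) ≠ '!')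
      have hP3 := pvEmit_chars _ 'o' 1 (fun ch => ch ≠ '!') hP2 (by decide : ('o' : Char) ≠ '!')
      obtain ⟨hg', hP', hd'⟩ := ih _ xy.1 xy.2 hg3 hP3
      refine ⟨hg', hP', ?_⟩
      rw [hd', pvEmit_decode _ _ _ hg2, pvEmit_decode _ _ _ hg1, pvEmit_decode _ _ _ hg]
      conv_rhs => rw [pvExpand]
      rw [if_pos hyy]
      simp [Int.toNat_one]
    · simp only [if_neg hyy]
      have hg2 := pvEmit_good runs 'b' (xy.1 - px - 1) hg
      have hg3 := pvEmit_good _ 'o' 1 hg2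
      have hP2 := pvEmit_chars runs 'b' (xy.1 - px - 1) (fun ch => ch ≠ '!') hP (by decide : ('b' : Char) ≠ '!')
      have hP3 := pvEmit_chars _ 'o' 1 (fun ch => ch ≠ '!') hP2 (by decide : ('o' : Char) ≠ '!')
      obtain ⟨hg', hP', hd'⟩ := ih _ xy.1 py hg3 hP3
      refine ⟨hg', hP', ?_⟩
      rw [hd', pvEmit_decode _ _ _ hg2, pvEmit_decode _ _ _ hg]
      conv_rhs => rw [pvExpand]
      rw [if_neg hyy]
      simp [Int.toNat_one]

-- ---- compression of a decoded run list ----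

theorem compress_scan (p : List Char) (L n : Nat) (c : Char) (hc : c ≠ '!')
    (hchar : ∀ i, i < n → p[L + i]? = some c)
    (j : Nat) (h1 : 1 ≤ j) (h2 : j ≤ n) (acc : List Char) :
    pvCompress p L (L + j) acc = pvCompress p L (L + n) acc := by
  by_cases hj : j = n
  · subst hj; rfl
  · have hjn : j < n := by omega
    have h0 := hchar 0 (by omega)
    simp only [Nat.add_zero] at h0
    have hL : L < p.length := (List.getElem?_eq_some_iff.mp h0).1
    have hcL : p[L] = c := (List.getElem?_eq_some_iff.mp h0).2
    have hLj : L + j < p.length := (List.getElem?_eq_some_iff.mp (hchar j hjn)).1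
    have hcLj : p[L + j] = c := (List.getElem?_eq_some_iff.mp (hchar j hjn)).2
    rw [pvCompress, dif_pos hL, if_neg (by rw [hcL]; exact hc), dif_pos hLj,
      if_neg (by rw [hcL, hcLj]; simp [hc])]
    rw [show L + j + 1 = L + (j + 1) by omega]
    exact compress_scan p L n c hc hchar (j + 1) (by omega) (by omega) acc
termination_by n - j

theorem compress_decode (R : List (Char × Int)) :
    pvGood R → (∀ r ∈ R, r.1 ≠ '!') →
    ∀ (pre acc : List Char),
      pvCompress (pre ++ pvDecode R ++ ['!']) pre.length (pre.length + 1) acc =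
        acc ++ pvRender R := by
  induction R with
  | nil =>
    intro _ _ pre acc
    have h? : (pre ++ pvDecode [] ++ ['!'])[pre.length]? = some '!' := by
      simp [pvDecode]
    have hL : pre.length < (pre ++ pvDecode [] ++ ['!']).length :=
      (List.getElem?_eq_some_iff.mp h?).1
    have hc : (pre ++ pvDecode [] ++ ['!'])[pre.length] = '!' :=
      (List.getElem?_eq_some_iff.mp h?).2
    rw [pvCompress, dif_pos hL, if_pos hc]
    simp [pvRender]
  | cons r R' ih =>
    intro hg hP pre acc
    obtain ⟨c, n⟩ := r
    have hn : 1 ≤ n := hg.2 (c, n) (by simp)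
    have hcne : c ≠ '!' := hP (c, n) (by simp)
    set N := n.toNat with hN
    have hN1 : 1 ≤ N := by omega
    set p := pre ++ pvDecode ((c, n) :: R') ++ ['!'] with hp
    have hdec : pvDecode ((c, n) :: R') = List.replicate N c ++ pvDecode R' := by
      simp [pvDecode, hN]
    have hchar : ∀ i, i < N → p[pre.length + i]? = some c := by
      intro i hi
      rw [hp, hdec, List.append_assoc, List.append_assoc,
        List.getElem?_append_right (by omega)]
      rw [show pre.length + i - pre.length = i by omega,
        List.getElem?_append_left (by simpa using hi)]
      simp [hi]
    rw [compress_scan p pre.length N c hcne hchar 1 (le_refl _) hN1 acc]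
    have h0 := hchar 0 (by omega)
    simp only [Nat.add_zero] at h0
    have hL : pre.length < p.length := (List.getElem?_eq_some_iff.mp h0).1
    have hcL : p[pre.length] = c := (List.getElem?_eq_some_iff.mp h0).2
    have hsuffix : p = (pre ++ List.replicate N c) ++ (pvDecode R' ++ ['!']) := by
      rw [hp, hdec]; simp
    have hLN? : p[pre.length + N]? = (pvDecode R' ++ ['!'])[0]? := by
      rw [hsuffix, List.getElem?_append_right (by simp)]
      congr 1
      simp
    have hhead : ∃ ce, p[pre.length + N]? = some ce ∧ (ce = '!' ∨ ce ≠ c) := by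
      rcases hR' : R' with _ | ⟨⟨c', k⟩, R''⟩
      · refine ⟨'!', ?_, Or.inl rfl⟩
        rw [hLN?]; simp [pvDecode, hR']
      · have hk : 1 ≤ k := hg.2 (c', k) (by simp [hR'])
        have hkN : 1 ≤ k.toNat := by omega
        have hcc' : c ≠ c' := by
          have hch := hg.1
          rw [hR'] at hch
          exact (List.isChain_cons_cons.mp hch).1
        refine ⟨c', ?_, Or.inr (fun he => hcc' he.symm)⟩
        rw [hLN?, hR']
        have hd2 : pvDecode ((c', k) :: R'') = List.replicate k.toNat c' ++ pvDecode R'' := by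
          simp [pvDecode]
        rw [hd2, List.append_assoc, show k.toNat = (k.toNat - 1) + 1 by omega,
          List.replicate_succ]
        simp
    obtain ⟨ce, hce, hcond⟩ := hhead
    have hLN : pre.length + N < p.length := (List.getElem?_eq_some_iff.mp hce).1
    have hceval : p[pre.length + N] = ce := (List.getElem?_eq_some_iff.mp hce).2
    rw [pvCompress, dif_pos hL, if_neg (by rw [hcL]; exact hcne), dif_pos hLN,
      if_pos (by rw [hceval, hcL]; exact hcond)]
    have harg : ((pre.length + N : Nat) : Int) - ((pre.length : Nat) : Int) = n := by
      push_cast; omega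
    rw [hcL, harg]
    have hg' : pvGood R' := ⟨hg.1.tail, fun r hr => hg.2 r (by simp [hr])⟩
    have hP' : ∀ r ∈ R', r.1 ≠ '!' := fun r hr => hP r (by simp [hr])
    have hpre' : p = (pre ++ List.replicate N c) ++ pvDecode R' ++ ['!'] := by
      rw [hsuffix]; simp
    have hlen' : (pre ++ List.replicate N c).length = pre.length + N := by simp
    have := ih hg' hP' (pre ++ List.replicate N c)
      (acc ++ (if (1 : Int) < n then PySem.Int.toChars n else []) ++ [c])
    rw [hlen', ← hpre'] at this
    rw [this]
    simp [pvRender, gt_iff_lt]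

-- ===== VERDICT (by name: the statement is the Claim_ definition above) =====
theorem pat_to_rle_spec : Claim_equal_pat_to_rle := by
  intro pattern _ hpre
  unfold Spec_pat_to_rle
  simp only [pat_to_rle, pat_to_rle_alt]
  have hperm := PySem.List.sorted2_perm pattern (fun x : Int × Int => x.2) (fun x => x.1) false
  set s := PySem.List.sorted2 pattern (fun x : Int × Int => x.2) (fun x => x.1) with hs
  have hsne : s ≠ [] := by
    intro hnil
    exact hpre ((hnil ▸ hperm).symm.eq_nil)
  obtain ⟨m, t, hmt⟩ := List.exists_cons_of_ne_nil hsne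
  rw [hmt]
  -- A side: lines = pvGrp [m] t
  have hlines : (m :: t).foldl (fun (lines : List (List (Int × Int))) x =>
      if lines.length = 0 then lines ++ [[x]]
      else if ((lines.getLastD []).getLastD (0, 0)).2 = x.2 then
        lines.dropLast ++ [(lines.getLastD []) ++ [x]]
      else lines ++ [[x]]) [] = pvGrp [m] t := by
    rw [List.foldl_cons]
    have hstep : (if ([] : List (List (Int × Int))).length = 0 then [] ++ [[m]]
        else if ((([] : List (List (Int × Int))).getLastD []).getLastD (0, 0)).2 = m.2 then
          ([] : List (List (Int × Int))).dropLast ++ [(([] : List (List (Int × Int))).getLastD []) ++ [m]]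
        else [] ++ [[m]]) = [[m]] := by simp
    rw [hstep]
    have := lines_foldl_eq_pvGrp t [] [m] (by simp)
    simpa using this
  rw [hlines, pvALoop_eq, List.nil_append]
  have hA : pvLineRender (pvGrp [m] t) = pvExpand (m :: t) (-1) m.2 ++ ['!'] := by
    rw [lineRender_pvGrp t [m] (by simp) (by simp)]
    simp only [List.foldl_cons, List.foldl_nil, pvStep_eval, List.headD_cons]
    conv_rhs => rw [pvExpand]
    rw [if_neg (by simp)]
    simp
  rw [hA]
  -- B side
  obtain ⟨hgR, hPR, hdR⟩ := bfold_decode (m :: t) [] (-1) m.2 ⟨by simp, by simp⟩ (by simp)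
  have hdR' : pvDecode ((m :: t).foldl pvBStep ([], -1, m.2)).1 = pvExpand (m :: t) (-1) m.2 := by
    rw [hdR]; simp [pvDecode]
  have hcomp := compress_decode ((m :: t).foldl pvBStep ([], -1, m.2)).1 hgR hPR [] []
  simp only [List.nil_append, List.length_nil, Nat.zero_add] at hcomp
  rw [hdR'] at hcomp
  simp only [List.headD_cons]
  rw [hcomp]
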